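-- pv_equiv track=rewrite | github.com/gt-hwswcosec/cmprs2025 | ProductRegisters/Tools/RootCounting/OverlappingRectangle.py | _solve_rec
-- ===== SOURCE A (Python) =====
-- from itertools import groupby
--
-- def preprocess(rectangle_list):
--     output = sorted(rectangle_list, key = lambda x: x[0], reverse=True)
--     output = [(k, [x[1:] for x in g]) for k, g in groupby(output, key = (lambda x: x[0]))]
--     output.append((0,[]))
--     return output
--
-- def rect_sset(rect_A,rect_B):
--     return all(a <= b for a,b in zip(rect_A,rect_B))
--
-- def insert_tuples(upper_layer, lower_layer):
--     still_needed = []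
--     for upper_rectangle in upper_layer:
--         needed = True
--
--         # if any rectangle in the lower layer needs includes this one:
--         # it is not needed for further area calculations
--         for lower_rectangle in lower_layer:
--             if rect_sset(upper_rectangle,lower_rectangle):
--                 needed = False
--                 break
--         if needed:
--             still_needed.append(upper_rectangle)
--
--     #add the rectangles which are still needed:
--     lower_layer += still_needed
--
-- def _solve_rec(dimension,rectangle_list):
--     # base case:
--     if dimension == 1:
--         return max(x[0] for x in rectangle_list)
--
--     total_area = 0
--     processed_list = preprocess(rectangle_list)
--
--     for layer in range(len(processed_list)-1):
--
--         # use the current dimension to get the width of the layer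
--         layer_width = processed_list[layer][0] - processed_list[layer+1][0]
--         # solve the subproblem 1 dimension down to get the cross-sectional area
--         cross_section_area = _solve_rec(dimension-1, processed_list[layer][1])
--         # multiply to get the volume of the cross-section and add to total area
--         total_area += layer_width * cross_section_area
--
--         # insert any still needed rectangles into the next layer:
--         # this ensures the cross-sectional area remains correct.
--         insert_tuples(processed_list[layer][1], processed_list[layer+1][1])
--
--     return total_area
-- ===== SOURCE B (Python) =====
-- def _solve_rec(dimension, rectangle_list):
--     boxes = [[r[i] for i in range(dimension)] for r in rectangle_list]
--     return _vol(boxes)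
--
-- def _leq(r, s):
--     return all(x <= y for x, y in zip(r, s))
--
-- def _prune(rects):
--     kept = []
--     for r in rects:
--         if any(_leq(r, s) for s in kept):
--             continue
--         kept = [s for s in kept if not _leq(s, r)] + [r]
--     return kept
--
-- def _vol(rects):
--     rects = _prune(rects)
--     if not rects:
--         return 0
--     b, rest = rects[0], rects[1:]
--     p = 1
--     for c in b:
--         p *= c
--     return p + _vol(rest) - _vol([[min(x, y) for x, y in zip(b, r)] for r in rest])
-- ===== Notes on version B (the rewrite author's own statement) =====
-- stated objective: alternative
-- what changed: Replaces A's sort/groupby first-coordinate sweep with recursion over dimensions by a direct measure recursion over the rectangle list (vol(b:rest) = vol(b) + vol(rest) - vol(pointwise-min(b,.) applied to rest)) with dominance pruning; no sorting, no grouping, no recursion on the dimension.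
import Mathlib
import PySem

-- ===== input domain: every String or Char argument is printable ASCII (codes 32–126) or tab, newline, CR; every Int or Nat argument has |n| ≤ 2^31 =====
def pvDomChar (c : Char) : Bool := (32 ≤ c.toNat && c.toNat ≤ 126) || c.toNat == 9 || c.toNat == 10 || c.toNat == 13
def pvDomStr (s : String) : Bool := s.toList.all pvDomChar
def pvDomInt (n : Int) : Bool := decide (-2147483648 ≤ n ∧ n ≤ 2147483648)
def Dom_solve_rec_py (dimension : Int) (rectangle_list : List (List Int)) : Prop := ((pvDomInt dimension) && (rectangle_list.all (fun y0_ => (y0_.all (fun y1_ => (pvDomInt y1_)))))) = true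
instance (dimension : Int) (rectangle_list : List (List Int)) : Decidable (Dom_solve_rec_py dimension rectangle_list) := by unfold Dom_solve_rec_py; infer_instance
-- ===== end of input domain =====

-- B replaces A's sort/groupby first-coordinate sweep (recursing over dimensions, with in-place
-- dominance insertion) by a direct measure recursion over the rectangle list with dominance pruning;
-- same value on every input A accepts (Pre_ below excludes exactly the inputs where A raises).

-- ===== PORT A =====
-- rect_sset(rect_A, rect_B) = all(a <= b for a, b in zip(rect_A, rect_B))
def pySset (a b : List Int) : Bool := (a.zip b).all fun p => decide (p.1 ≤ p.2)

-- groupby step of preprocess: [(k, [x[1:] for x in g]) for k, g in groupby(output, key=lambda x: x[0])]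
-- x[0] is ported as List.headI: exact for the nonempty rectangles Pre_ admits (Python raises on [])
def preGroup : List (List Int) → List (Int × List (List Int))
  | [] => []
  | x :: xs =>
    (x.headI, (x :: xs.takeWhile (fun y => y.headI == x.headI)).map
        (fun r => PySem.List.slice r (some 1) none)) ::
      preGroup (xs.dropWhile (fun y => y.headI == x.headI))
termination_by l => l.length
decreasing_by
  simp only [List.length_cons]
  exact Nat.lt_succ_of_le (List.length_dropWhile_le _ _)

def preprocess_py (l : List (List Int)) : List (Int × List (List Int)) :=
  preGroup (PySem.List.sorted l (fun r => r.headI) true) ++ [(0, [])]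

-- insert_tuples: the lower layer becomes lower ++ still_needed (the in-place '+=' made explicit)
def stillNeeded (upper lower : List (List Int)) : List (List Int) :=
  upper.filter (fun u => ! lower.any (fun w => pySset u w))

-- _solve_rec's recursion on `dimension` is made total by a fuel counter (dimension.toNat);
-- fuel runs out only where the Python raises (dimension ≤ 0 with nonempty input), outside Pre_
mutual
  def goA : Nat → Int → List (List Int) → Int
    | 0, _, _ => 0
    | fuel + 1, d, l =>
      if d = 1 then
        match l.map (fun r => r.headI) with
        | [] => 0  -- Python: max() of an empty generator raises ValueError (outside Pre_)
        | a :: as => as.foldl max a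
      else loopA fuel d (preprocess_py l)
  termination_by fuel => (fuel, 0)

  def loopA : Nat → Int → List (Int × List (List Int)) → Int
    | _, _, [] => 0
    | _, _, [_] => 0
    | fuel, d, (v, g) :: (v', g') :: rest =>
      (v - v') * goA fuel (d - 1) g + loopA fuel d ((v', g' ++ stillNeeded g g') :: rest)
  termination_by fuel _ layers => (fuel, layers.length)
end

def solve_rec_py (dimension : Int) (rectangle_list : List (List Int)) : Int :=
  goA dimension.toNat dimension rectangle_list

-- ===== PORT B =====
def vleq (r s : List Int) : Bool := (r.zip s).all fun p => decide (p.1 ≤ p.2)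

def pruneGo (kept : List (List Int)) : List (List Int) → List (List Int)
  | [] => kept
  | r :: rs =>
    if kept.any (fun s => vleq r s) then pruneGo kept rs
    else pruneGo ((kept.filter (fun s => ! vleq s r)) ++ [r]) rs

def pruneB (rects : List (List Int)) : List (List Int) := pruneGo [] rects

-- needed by volB's termination proof
theorem pruneGo_length_le (kept : List (List Int)) (l : List (List Int)) :
    (pruneGo kept l).length ≤ kept.length + l.length := by
  induction l generalizing kept with
  | nil => simp [pruneGo]
  | cons r rs ih =>
    simp only [pruneGo]
    split
    · exact le_trans (ih kept) (by simp only [List.length_cons]; omega)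
    · refine le_trans (ih _) ?_
      have h1 := List.length_filter_le (fun s => ! vleq s r) kept
      simp only [List.length_append, List.length_cons, List.length_nil] at *
      omega

theorem pruneB_length_le (rects : List (List Int)) : (pruneB rects).length ≤ rects.length := by
  simpa [pruneB] using pruneGo_length_le [] rects

def volB (rects : List (List Int)) : Int :=
  match h : pruneB rects with
  | [] => 0
  | b :: rest =>
    (b.foldl (· * ·) 1) + volB rest
      - volB (rest.map (fun r => (b.zip r).map (fun p => min p.1 p.2)))
termination_by rects.length
decreasing_by
  · have := pruneB_length_le rects
    rw [h] at this
    simp at this ⊢; omega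
  · have := pruneB_length_le rects
    rw [h] at this
    simp at this ⊢; omega

-- boxes = [[r[i] for i in range(dimension)] for r in rectangle_list]
def solve_rec_py_alt (dimension : Int) (rectangle_list : List (List Int)) : Int :=
  volB (rectangle_list.map (fun r =>
    (PySem.List.pyRange 0 dimension 1).map (fun i => PySem.List.pyGetD r i 0)))

-- ===== PRECONDITION & SPEC =====
-- Pre_ excludes exactly the inputs on which A raises: an empty list with dimension == 1
-- (max() of an empty generator, ValueError), a nonempty list with dimension ≤ 0 (the recursion
-- reaches an empty rectangle and x[0] raises IndexError), and any rectangle shorter than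
-- `dimension` (x[0]/max reaches an exhausted rectangle, IndexError). A returns on all other inputs.
def Pre_solve_rec_py (dimension : Int) (rectangle_list : List (List Int)) : Prop :=
  (∀ r ∈ rectangle_list, dimension ≤ (r.length : Int)) ∧
  (rectangle_list = [] → dimension ≠ 1) ∧
  (rectangle_list ≠ [] → 1 ≤ dimension)
instance (dimension : Int) (rectangle_list : List (List Int)) : Decidable (Pre_solve_rec_py dimension rectangle_list) := by unfold Pre_solve_rec_py; infer_instance

def pvWitness_solve_rec_py : Int × List (List Int) := (2, [[3, 4], [1, 5], [2, 2]])

def Spec_solve_rec_py (dimension : Int) (rectangle_list : List (List Int)) (out : Int) : Prop := out = solve_rec_py_alt dimension rectangle_list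
instance (dimension : Int) (rectangle_list : List (List Int)) (out : Int) : Decidable (Spec_solve_rec_py dimension rectangle_list out) := by unfold Spec_solve_rec_py; infer_instance

-- ===== CLAIM (what is proved, stated in full; the proofs are below) =====
def Claim_equal_solve_rec_py : Prop := ∀ (dimension : Int) (rectangle_list : List (List Int)), Dom_solve_rec_py dimension rectangle_list → Pre_solve_rec_py dimension rectangle_list → Spec_solve_rec_py dimension rectangle_list (solve_rec_py dimension rectangle_list)

-- ===== LEMMAS AND PROOFS =====
-- pointwise minimum of two rectangles (what B's zip/min comprehension computes)
def pm (a b : List Int) : List Int := List.zipWith min a b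

theorem pm_comm (a b : List Int) : pm a b = pm b a :=
  List.zipWith_comm_of_comm (fun x y => min_comm x y)

theorem pm_length (a b : List Int) : (pm a b).length = min a.length b.length :=
  List.length_zipWith

theorem pm_cons (h h' : Int) (t t' : List Int) : pm (h :: t) (h' :: t') = min h h' :: pm t t' := rfl

theorem pm_mixed (a b x : List Int) : pm (pm a b) (pm a x) = pm a (pm b x) := by
  apply List.ext_getElem
  · simp [pm, List.length_zipWith]; omega
  · intro i h1 h2
    simp [pm, List.getElem_zipWith]
    exact min_left_comm _ _ _

-- the union-volume recursion on a list of (already truncated) rectangles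
def V : List (List Int) → Int
  | [] => 0
  | b :: rest => b.prod + V rest - V (rest.map (pm b))
termination_by l => l.length
decreasing_by
  · simp
  · simp

@[simp] theorem V_nil : V [] = 0 := by rw [V]

theorem V_cons (b : List Int) (rest : List (List Int)) :
    V (b :: rest) = b.prod + V rest - V (rest.map (pm b)) := by rw [V]
theorem pm_left_comm (a b x : List Int) : pm a (pm b x) = pm b (pm a x) := by
  apply List.ext_getElem
  · simp [pm, List.length_zipWith]; omega
  · intro i h1 h2
    simp [pm, List.getElem_zipWith]
    exact min_left_comm _ _ _

theorem map_pm_cons (v : Int) (t : List Int) (ts : List (List Int)) :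
    (ts.map (fun x => v :: x)).map (pm (v :: t)) = (ts.map (pm t)).map (fun x => v :: x) := by
  simp only [List.map_map]
  apply List.map_congr_left
  intro x _
  simp [Function.comp, pm_cons]

theorem Vflat (v : Int) : ∀ (n : Nat) (ts : List (List Int)), ts.length = n →
    V (ts.map (fun t => v :: t)) = v * V ts := by
  intro n
  induction n with
  | zero => intro ts h; rw [List.length_eq_zero_iff] at h; subst h; simp
  | succ n ih =>
    intro ts h
    match ts with
    | t :: ts' =>
      simp only [List.length_cons, Nat.succ.injEq] at h
      simp only [List.map_cons]
      rw [V_cons, V_cons (b := t) (rest := ts')]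
      rw [map_pm_cons]
      rw [ih ts' h, ih (ts'.map (pm t)) (by simp [h])]
      simp [List.prod_cons]
      ring
theorem foldl_max_max (l : List Int) : ∀ (x y : Int), l.foldl max (max x y) = max x (l.foldl max y) := by
  induction l with
  | nil => intro x y; simp
  | cons h t ih =>
    intro x y
    simp only [List.foldl_cons]
    rw [max_assoc, ih]

theorem foldl_max_min (l : List Int) : ∀ (c x : Int),
    (l.map (fun h => min c h)).foldl max (min c x) = min c (l.foldl max x) := by
  induction l with
  | nil => intro c x; simp
  | cons h t ih =>
    intro c x
    simp only [List.map_cons, List.foldl_cons]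
    rw [← min_max_distrib_left, ih]

theorem Vmax : ∀ (n : Nat) (hs : List Int) (a : Int), hs.length = n →
    V ((a :: hs).map (fun h => [h])) = hs.foldl max a := by
  intro n
  induction n with
  | zero =>
    intro hs a h; rw [List.length_eq_zero_iff] at h; subst h
    simp [V_cons]
  | succ n ih =>
    intro hs a h
    match hs with
    | h1 :: hs' =>
      simp only [List.length_cons, Nat.succ.injEq] at h
      rw [List.map_cons, V_cons]
      have e1 : (((h1 :: hs').map (fun h => [h])).map (pm [a])) =
          ((min a h1 :: hs'.map (fun h => min a h)).map (fun h => [h])) := by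
        simp only [List.map_map, List.map_cons]
        constructor
      rw [e1]
      rw [ih hs' h1 h, ih (hs'.map (fun h => min a h)) (min a h1) (by simp [h])]
      rw [List.foldl_cons, foldl_max_min]
      simp only [List.prod_cons, List.prod_nil, mul_one]
      rw [foldl_max_max]
      rcases le_total a (List.foldl max h1 hs') with hh | hh
      · rw [min_eq_left hh, max_eq_right hh]; ring
      · rw [min_eq_right hh, max_eq_left hh]; ring
theorem Vswap (a b : List Int) (t : List (List Int)) : V (a :: b :: t) = V (b :: a :: t) := by
  rw [V_cons, V_cons (b := b) (rest := t), List.map_cons, V_cons,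
      V_cons (b := b) (rest := a :: t), V_cons (b := a) (rest := t), List.map_cons, V_cons]
  simp only [List.map_map]
  have e1 : (t.map (pm a)).map (pm (pm a b)) = (t.map (pm b)).map (pm (pm b a)) := by
    simp only [List.map_map]
    apply List.map_congr_left
    intro x _
    simp only [Function.comp]
    rw [pm_mixed, pm_mixed, pm_left_comm]
  have e2 : (pm a b).prod = (pm b a).prod := by rw [pm_comm]
  rw [← List.map_map, ← List.map_map (g := pm (pm b a)) (f := pm b), e1, e2]
  ring

theorem Vmove : ∀ (n : Nat) (xs ys : List (List Int)) (a : List Int), xs.length = n →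
    V (xs ++ a :: ys) = V (a :: (xs ++ ys)) := by
  intro n
  induction n with
  | zero => intro xs ys a h; rw [List.length_eq_zero_iff] at h; subst h; simp
  | succ n ih =>
    intro xs ys a h
    match xs with
    | b :: xs' =>
      simp only [List.length_cons, Nat.succ.injEq] at h
      rw [List.cons_append, V_cons, List.map_append, List.map_cons]
      rw [ih xs' ys a h, ih (xs'.map (pm b)) (ys.map (pm b)) (pm b a) (by simp [h])]
      rw [← List.map_append]
      have : V (b :: a :: (xs' ++ ys)) =
          b.prod + V (a :: (xs' ++ ys)) - V (pm b a :: (xs' ++ ys).map (pm b)) := by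
        rw [V_cons]; rfl
      rw [← this, Vswap]
      rfl

theorem Vperm : ∀ (n : Nat) (l m : List (List Int)), l.length = n → l.Perm m → V l = V m := by
  intro n
  induction n using Nat.strong_induction_on with
  | _ n ih =>
    intro l m hl hp
    match l with
    | [] => rw [List.Perm.nil_eq hp]  -- m = []
    | a :: l' =>
      obtain ⟨m1, m2, rfl⟩ := List.append_of_mem (hp.mem_iff.mp (List.mem_cons_self))
      have hp' : l'.Perm (m1 ++ m2) := (hp.trans List.perm_middle).cons_inv
      simp only [List.length_cons] at hl
      have hn : n - 1 < n := by omega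
      have hl' : l'.length = n - 1 := by omega
      rw [V_cons]
      rw [ih (n-1) hn l' (m1 ++ m2) hl' hp']
      rw [ih (n-1) hn (l'.map (pm a)) ((m1 ++ m2).map (pm a)) (by simp [hl']) (hp'.map (pm a))]
      have : V (a :: (m1 ++ m2)) = a.prod + V (m1 ++ m2) - V ((m1 ++ m2).map (pm a)) := V_cons _ _
      rw [← this, ← Vmove m1.length m1 m2 a rfl]
-- coordinatewise domination between equal-length rectangles
def DomL (a b : List Int) : Prop := a.length = b.length ∧ ∀ i : Nat, a.getD i 0 ≤ b.getD i 0

theorem DomL_refl (a : List Int) : DomL a a := ⟨rfl, fun _ => le_refl _⟩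

theorem DomL_trans {a b c : List Int} (h1 : DomL a b) (h2 : DomL b c) : DomL a c :=
  ⟨h1.1.trans h2.1, fun i => (h1.2 i).trans (h2.2 i)⟩

theorem getD_eq_zero_of_le {a : List Int} {i : Nat} (h : a.length ≤ i) : a.getD i 0 = 0 := by
  rw [List.getD_eq_getElem?_getD, List.getElem?_eq_none (by omega)]; rfl

theorem pm_getD {a b : List Int} {i : Nat} (h : i < (pm a b).length) :
    (pm a b).getD i 0 = min (a.getD i 0) (b.getD i 0) := by
  rw [pm_length] at h
  rw [List.getD_eq_getElem?_getD, List.getElem?_eq_getElem (by rw [pm_length]; omega)]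
  simp only [pm, List.getElem_zipWith, Option.getD_some]
  rw [List.getD_eq_getElem?_getD, List.getElem?_eq_getElem (by omega),
      List.getD_eq_getElem?_getD, List.getElem?_eq_getElem (by omega)]
  rfl

theorem DomL_pm_eq_left {a b : List Int} (h : DomL a b) : pm a b = a := by
  apply List.ext_getElem
  · rw [pm_length, h.1, min_self]
  · intro i h1 h2
    have hg : (pm a b).getD i 0 = a.getD i 0 := by
      rw [pm_getD h1, min_eq_left]
      have := h.2 i; omega
    rw [List.getD_eq_getElem?_getD, List.getElem?_eq_getElem h1] at hg
    rw [List.getD_eq_getElem?_getD, List.getElem?_eq_getElem h2] at hg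
    simpa using hg

theorem DomL_pm_eq_right {a b : List Int} (h : DomL b a) : pm a b = b := by
  rw [pm_comm]; exact DomL_pm_eq_left h

theorem DomL_pm_left {a x : List Int} (h : x.length = a.length) : DomL (pm a x) a := by
  constructor
  · rw [pm_length, h, min_self]
  · intro i
    by_cases hi : i < (pm a x).length
    · rw [pm_getD hi]; exact min_le_left _ _
    · rw [getD_eq_zero_of_le (by omega)]
      by_cases hia : i < a.length
      · rw [pm_length, h, min_self] at hi; omega
      · rw [getD_eq_zero_of_le (by omega)]

theorem Vconst : ∀ (n : Nat) (l : List (List Int)) (t : List Int), l.length = n → l ≠ [] →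
    (∀ e ∈ l, DomL e t) → t ∈ l → V l = t.prod := by
  intro n
  induction n using Nat.strong_induction_on with
  | _ n ih =>
    intro l t hl hne hdom htm
    match l with
    | [a] =>
      have : t = a := List.eq_of_mem_singleton htm
      subst this
      simp [V_cons]
    | a :: r1 :: r' =>
      have hda : DomL a t := hdom a List.mem_cons_self
      have hlen : ∀ x ∈ r1 :: r', x.length = a.length := by
        intro x hx
        have := (hdom x (List.mem_cons_of_mem _ hx)).1
        rw [this, hda.1]
      simp only [List.length_cons] at hl
      by_cases hm : t ∈ r1 :: r'
      · have h1 : V (r1 :: r') = t.prod := by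
          refine ih (n-1) (by omega) (r1 :: r') t (by simp; omega) (by simp) ?_ hm
          exact fun e he => hdom e (List.mem_cons_of_mem _ he)
        have h2 : V ((r1 :: r').map (pm a)) = a.prod := by
          refine ih (n-1) (by omega) ((r1 :: r').map (pm a)) a (by simp; omega) (by simp) ?_ ?_
          · intro e he
            obtain ⟨x, hx, rfl⟩ := List.mem_map.mp he
            exact DomL_pm_left (by rw [(hdom x (List.mem_cons_of_mem _ hx)).1, hda.1])
          · refine List.mem_map.mpr ⟨t, hm, ?_⟩
            exact DomL_pm_eq_left hda
        rw [V_cons, h1, h2]; ring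
      · have hta : t = a := by
          rcases List.mem_cons.mp htm with h | h
          · exact h
          · exact absurd h hm
        subst hta
        have hmap : (r1 :: r').map (pm t) = r1 :: r' := by
          have h0 : ∀ x ∈ r1 :: r', pm t x = id x :=
            fun x hx => DomL_pm_eq_right (hdom x (List.mem_cons_of_mem _ hx))
          simpa using List.map_congr_left h0
        rw [V_cons, hmap]
        ring

theorem Vcancel (t u : List Int) (l : List (List Int)) (hdom : DomL t u) (hu : u ∈ l)
    (hlen : ∀ x ∈ l, x.length = t.length) : V (t :: l) = V l := by
  have h1 : V (l.map (pm t)) = t.prod := by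
    refine Vconst (l.map (pm t)).length (l.map (pm t)) t rfl ?_ ?_ ?_
    · simp; rintro rfl; simp at hu
    · intro e he
      obtain ⟨x, hx, rfl⟩ := List.mem_map.mp he
      exact DomL_pm_left (hlen x hx)
    · exact List.mem_map.mpr ⟨u, hu, DomL_pm_eq_left hdom⟩
  rw [V_cons, h1]; ring

def EqLen (k : Nat) (l : List (List Int)) : Prop := ∀ r ∈ l, r.length = k

theorem Vabsorb (k : Nat) : ∀ (m l : List (List Int)), EqLen k m → EqLen k l →
    (∀ b ∈ m, ∃ a ∈ l, DomL b a) → V (m ++ l) = V l := by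
  intro m
  induction m with
  | nil => simp
  | cons b m' ih =>
    intro l hm hl hdom
    obtain ⟨a, ha, hba⟩ := hdom b List.mem_cons_self
    rw [List.cons_append]
    rw [Vcancel b a (m' ++ l) hba (List.mem_append_right _ ha) ?_]
    · exact ih l (fun r hr => hm r (List.mem_cons_of_mem _ hr)) hl
        (fun r hr => hdom r (List.mem_cons_of_mem _ hr))
    · intro x hx
      rw [hm b List.mem_cons_self]
      rcases List.mem_append.mp hx with h | h
      · exact hm x (List.mem_cons_of_mem _ h)
      · exact hl x h

theorem Vmutual (k : Nat) (l m : List (List Int)) (hl : EqLen k l) (hm : EqLen k m)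
    (h1 : ∀ a ∈ l, ∃ b ∈ m, DomL a b) (h2 : ∀ b ∈ m, ∃ a ∈ l, DomL b a) : V l = V m := by
  have e1 : V (m ++ l) = V l := Vabsorb k m l hm hl h2
  have e2 : V (l ++ m) = V m := Vabsorb k l m hl hm h1
  rw [← e1, ← e2]
  exact Vperm (m ++ l).length _ _ rfl (List.perm_append_comm)
def capL (b : Int) (l : List (List Int)) : List (List Int) :=
  l.map (fun r => match r with | [] => ([] : List Int) | h :: t => min h b :: t)

@[simp] theorem capL_nil (b : Int) : capL b [] = [] := rfl
@[simp] theorem capL_cons (b h : Int) (t : List Int) (l : List (List Int)) :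
    capL b ((h :: t) :: l) = (min h b :: t) :: capL b l := rfl

def tTop (a : Int) (l : List (List Int)) : List (List Int) :=
  (l.filter (fun r => decide (r.headI = a))).map (fun r => r.tail)

def Shp2 (a b : Int) (l : List (List Int)) : Prop :=
  ∀ r ∈ l, ∃ h t, r = h :: t ∧ (h = a ∨ h ≤ b)

theorem capL_id (b : Int) (l : List (List Int)) (h : ∀ r ∈ l, ∃ h' t, r = h' :: t ∧ h' ≤ b) :
    capL b l = l := by
  have h0 : ∀ r ∈ l, (match r with | [] => ([] : List Int) | h :: t => min h b :: t) = id r := by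
    intro r hr
    obtain ⟨h', t, rfl, hle⟩ := h r hr
    simp [min_eq_left hle]
  simpa [capL] using List.map_congr_left h0

theorem shave_maps (t : List Int) (a b : Int) (hba : b < a) :
    ∀ rest : List (List Int), Shp2 a b rest →
      ((rest.map (pm (a :: t))).filter (fun r => decide (r.headI = a))).map List.tail
          = ((rest.filter (fun r => decide (r.headI = a))).map List.tail).map (pm t)
        ∧ capL b (rest.map (pm (a :: t))) = (capL b rest).map (pm (min a b :: t))
        ∧ Shp2 a b (rest.map (pm (a :: t))) := by
  intro rest
  induction rest with
  | nil => exact fun _ => ⟨rfl, rfl, by intro r hr; simp at hr⟩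
  | cons x rest ih =>
    intro hs
    obtain ⟨h', t', rfl, hcase⟩ := hs _ List.mem_cons_self
    obtain ⟨e1, e2, e3⟩ := ih (fun r hr => hs r (List.mem_cons_of_mem _ hr))
    have hmab : min a b = b := min_eq_right (le_of_lt hba)
    rcases hcase with rfl | hle
    · refine ⟨?_, ?_, ?_⟩
      · rw [List.map_cons, pm_cons, min_self,
            List.filter_cons_of_pos (by simp [List.headI]),
            List.filter_cons_of_pos (by simp [List.headI]),
            List.map_cons, List.map_cons, List.map_cons, e1]
        rfl
      · rw [List.map_cons, pm_cons, min_self, capL_cons]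
        simp only [capL_cons, List.map_cons, pm_cons, min_self, e2]
      · intro r hr
        rcases List.mem_cons.mp hr with rfl | hr
        · exact ⟨min h' h', pm t t', by rw [pm_cons], Or.inl (by simp)⟩
        · exact e3 r hr
    · have hlt : h' < a := lt_of_le_of_lt hle hba
      refine ⟨?_, ?_, ?_⟩
      · rw [List.map_cons, pm_cons, min_eq_right (le_of_lt hlt),
            List.filter_cons_of_neg (by simp [List.headI]; omega),
            List.filter_cons_of_neg (by simp [List.headI]; omega), e1]
      · rw [List.map_cons, pm_cons, min_eq_right (le_of_lt hlt), capL_cons, capL_cons,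
            List.map_cons, pm_cons, e2, min_eq_left hle, hmab, min_comm b h',
            min_eq_left hle]
      · intro r hr
        rcases List.mem_cons.mp hr with rfl | hr
        · exact ⟨min a h', pm t t', by rw [pm_cons],
            Or.inr (by rw [min_eq_right (le_of_lt hlt)]; exact hle)⟩
        · exact e3 r hr
theorem Vshave : ∀ (n : Nat) (l : List (List Int)) (a b : Int), l.length = n → b ≤ a →
    Shp2 a b l → V l = (a - b) * V (tTop a l) + V (capL b l) := by
  intro n
  induction n using Nat.strong_induction_on with
  | _ n ih =>
    intro l a b hl hba hs
    rcases eq_or_lt_of_le hba with rfl | hba'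
    · have : capL b l = l := by
        apply capL_id
        intro r hr
        obtain ⟨h, t, rfl, hc⟩ := hs r hr
        exact ⟨h, t, rfl, by rcases hc with rfl | hc <;> omega⟩
      rw [this]; ring
    · match l with
      | [] => simp [tTop]
      | r :: rest =>
        obtain ⟨h, t, rfl, hcase⟩ := hs _ List.mem_cons_self
        have hsrest : Shp2 a b rest := fun x hx => hs x (List.mem_cons_of_mem _ hx)
        simp only [List.length_cons] at hl
        have ihrest := ih (n-1) (by omega) rest a b (by omega) hba hsrest
        rcases hcase with rfl | hle
        · -- head value is a: the layer being shaved
          obtain ⟨e1, e2, e3⟩ := shave_maps t h b hba' rest hsrest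
          have ihmap := ih (n-1) (by omega) (rest.map (pm (h :: t))) h b (by simp; omega) hba e3
          have hmab : min h b = b := min_eq_right (le_of_lt hba')
          have et : tTop h (rest.map (pm (h :: t))) = (tTop h rest).map (pm t) := by
            unfold tTop; exact e1
          have etc : tTop h ((h :: t) :: rest) = t :: tTop h rest := by
            unfold tTop
            rw [List.filter_cons_of_pos (by simp [List.headI]), List.map_cons, List.tail_cons]
          rw [V_cons, ihmap, et, e2, hmab, ihrest, etc, capL_cons, hmab]
          rw [V_cons (b := t) (rest := tTop h rest), V_cons (b := b :: t) (rest := capL b rest)]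
          simp only [List.prod_cons]
          ring
        · -- head value is ≤ b: untouched by the shave
          have hlt : h < a := lt_of_le_of_lt hle hba'
          have ecap : (capL b rest).map (pm (h :: t)) = rest.map (pm (h :: t)) := by
            have h0 : ∀ r ∈ rest, pm (h :: t) (match r with | [] => ([] : List Int) | h' :: t' => min h' b :: t') = pm (h :: t) r := by
              intro r hr
              obtain ⟨h', t', rfl, hc⟩ := hsrest r hr
              have hmm : min h (min h' b) = min h h' := by
                rcases hc with rfl | hc
                · rw [min_eq_right (le_of_lt hba'), min_eq_left hle, min_eq_left (le_of_lt hlt)]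
                · rw [min_eq_left hc]
              simp only [pm_cons, hmm]
            unfold capL
            rw [List.map_map]
            exact List.map_congr_left h0
          have etc : tTop a ((h :: t) :: rest) = tTop a rest := by
            unfold tTop
            rw [List.filter_cons_of_neg (by simp [List.headI]; omega)]
          rw [V_cons, ihrest, etc, capL_cons, min_eq_left hle]
          rw [V_cons (b := h :: t) (rest := capL b rest), ecap]
          ring
def tailsGe (v : Int) (l : List (List Int)) : List (List Int) :=
  (l.filter (fun r => decide (v ≤ r.headI))).map (fun r => r.tail)

def layerSum : List Int → List (List Int) → Int
  | [], _ => 0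
  | [_], _ => 0
  | v :: v' :: c, l => (v - v') * V (tailsGe v l) + layerSum (v' :: c) l

def Shp (vals : List Int) (l : List (List Int)) : Prop :=
  ∀ r ∈ l, ∃ h t, r = h :: t ∧ h ∈ vals

theorem Vflat_all (v : Int) (l : List (List Int)) (h : ∀ r ∈ l, ∃ t, r = v :: t) :
    V l = v * V (l.map List.tail) := by
  have e : (l.map List.tail).map (fun t => v :: t) = l := by
    rw [List.map_map]
    have h0 : ∀ r ∈ l, ((fun t => v :: t) ∘ List.tail) r = id r := by
      intro r hr
      obtain ⟨t, rfl⟩ := h r hr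
      rfl
    simpa using List.map_congr_left h0
  rw [← e, Vflat v (l.map List.tail).length _ rfl]
  rw [e]

theorem tailsGe_cap (w b : Int) (hwb : w ≤ b) (l : List (List Int))
    (hne : ∀ r ∈ l, r ≠ []) : tailsGe w (capL b l) = tailsGe w l := by
  induction l with
  | nil => rfl
  | cons r rest ih =>
    match r, hne r List.mem_cons_self with
    | h :: t, _ =>
      have ih' := ih (fun x hx => hne x (List.mem_cons_of_mem _ hx))
      unfold tailsGe at ih' ⊢
      rw [capL_cons, List.filter_cons, List.filter_cons]
      simp only [List.headI_cons]
      by_cases hw : w ≤ h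
      · have hmb : w ≤ min h b := le_min hw hwb
        simp only [hw, hmb, decide_true, if_true, List.map_cons, List.tail_cons]
        rw [ih']
      · have hmb : ¬ w ≤ min h b := by rw [le_min_iff]; tauto
        simp only [hw, hmb, decide_false, Bool.false_eq_true, if_false]
        exact ih'

theorem layerSum_cap (b : Int) (l : List (List Int)) (hne : ∀ r ∈ l, r ≠ []) :
    ∀ c : List Int, (∀ w ∈ c, w ≤ b) →
      layerSum (c ++ [0]) (capL b l) = layerSum (c ++ [0]) l := by
  intro c
  induction c with
  | nil => intro _; rfl
  | cons w ws ih =>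
    intro hc
    match ws with
    | [] =>
      show (w - 0) * V (tailsGe w (capL b l)) + layerSum [0] (capL b l) =
        (w - 0) * V (tailsGe w l) + layerSum [0] l
      rw [tailsGe_cap w b (hc w List.mem_cons_self) l hne]
      rfl
    | w2 :: ws' =>
      show (w - w2) * V (tailsGe w (capL b l)) + layerSum ((w2 :: ws') ++ [0]) (capL b l) =
        (w - w2) * V (tailsGe w l) + layerSum ((w2 :: ws') ++ [0]) l
      rw [tailsGe_cap w b (hc w List.mem_cons_self) l hne,
          ih (fun x hx => hc x (List.mem_cons_of_mem _ hx))]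

theorem Vlayers : ∀ (vals : List Int) (l : List (List Int)), vals ≠ [] →
    vals.Pairwise (· > ·) → Shp vals l → V l = layerSum (vals ++ [0]) l := by
  intro vals
  induction vals with
  | nil => intro l h; exact absurd rfl h
  | cons v vs ih =>
    intro l _ hpw hs
    match vs with
    | [] =>
      show V l = (v - 0) * V (tailsGe v l) + layerSum [0] l
      have hsh : ∀ r ∈ l, ∃ t, r = v :: t := by
        intro r hr
        obtain ⟨h, t, rfl, hm⟩ := hs r hr
        simp at hm
        subst hm
        exact ⟨t, rfl⟩
      have : tailsGe v l = l.map List.tail := by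
        unfold tailsGe
        rw [List.filter_eq_self.mpr]
        intro r hr
        obtain ⟨t, rfl⟩ := hsh r hr
        simp [List.headI]
      rw [this, Vflat_all v l hsh]
      show _ = _ + (0 : Int)
      ring
    | v' :: vs' =>
      have hcons := List.pairwise_cons.mp hpw
      have hv'v : v' < v := hcons.1 v' List.mem_cons_self
      have hs2 : Shp2 v v' l := by
        intro r hr
        obtain ⟨h, t, rfl, hm⟩ := hs r hr
        refine ⟨h, t, rfl, ?_⟩
        rcases List.mem_cons.mp hm with rfl | hm
        · exact Or.inl rfl
        · rcases List.mem_cons.mp hm with rfl | hm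
          · exact Or.inr (le_refl _)
          · exact Or.inr (le_of_lt ((List.pairwise_cons.mp hcons.2).1 h hm))
      have hshave := Vshave l.length l v v' rfl (le_of_lt hv'v) hs2
      have htt : tTop v l = tailsGe v l := by
        unfold tTop tailsGe
        refine congrArg _ (List.filter_congr ?_)
        intro r hr
        obtain ⟨h, t, rfl, hm⟩ := hs2 r hr
        simp only [List.headI_cons]
        rcases hm with rfl | hle
        · simp
        · have : ¬ (h = v) := by omega
          have h2 : ¬ (v ≤ h) := by omega
          simp [this, h2]
      have hshp' : Shp (v' :: vs') (capL v' l) := by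
        intro r hr
        unfold capL at hr
        obtain ⟨x, hx, rfl⟩ := List.mem_map.mp hr
        obtain ⟨h, t, rfl, hm⟩ := hs x hx
        refine ⟨min h v', t, rfl, ?_⟩
        rcases List.mem_cons.mp hm with rfl | hm
        · rw [min_eq_right (le_of_lt hv'v)]; exact List.mem_cons_self
        · rcases List.mem_cons.mp hm with rfl | hm
          · rw [min_self]; exact List.mem_cons_self
          · rw [min_eq_left (le_of_lt ((List.pairwise_cons.mp hcons.2).1 h hm))]
            exact List.mem_cons_of_mem _ hm
      have ihcap := ih (capL v' l) (by simp) hcons.2 hshp'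
      have hne : ∀ r ∈ l, r ≠ [] := by
        intro r hr
        obtain ⟨h, t, rfl, _⟩ := hs r hr
        simp
      have hcap := layerSum_cap v' l hne (v' :: vs')
        (by
          intro w hw
          rcases List.mem_cons.mp hw with rfl | hw
          · exact le_refl _
          · exact le_of_lt ((List.pairwise_cons.mp hcons.2).1 w hw))
      show V l = (v - v') * V (tailsGe v l) + layerSum ((v' :: vs') ++ [0]) l
      rw [← hcap, ← ihcap, ← htt]
      exact hshave
theorem zip_map_min_eq_pm : ∀ (b r : List Int), (b.zip r).map (fun p => min p.1 p.2) = pm b r := by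
  intro b
  induction b with
  | nil => intro r; rfl
  | cons x xs ih =>
    intro r
    match r with
    | [] => rfl
    | y :: ys => simp [pm, List.zip_cons_cons, ih ys, List.zipWith]

theorem DomL_cons_iff (x y : Int) (xs ys : List Int) :
    DomL (x :: xs) (y :: ys) ↔ x ≤ y ∧ DomL xs ys := by
  constructor
  · intro ⟨hl, hv⟩
    refine ⟨by simpa using hv 0, by simpa using hl, fun i => by simpa using hv (i + 1)⟩
  · intro ⟨hxy, hl, hv⟩
    refine ⟨by simpa using hl, fun i => ?_⟩
    match i with
    | 0 => simpa using hxy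
    | i + 1 => simpa using hv i

theorem vleq_iff_DomL : ∀ (a b : List Int), a.length = b.length → (vleq a b = true ↔ DomL a b) := by
  intro a
  induction a with
  | nil =>
    intro b hb
    cases b with
    | nil => simp [vleq, DomL]
    | cons y ys => simp at hb
  | cons x xs ih =>
    intro b hb
    match b with
    | y :: ys =>
      simp only [List.length_cons, Nat.succ.injEq] at hb
      rw [DomL_cons_iff]
      simp only [vleq, List.zip_cons_cons, List.all_cons, Bool.and_eq_true, decide_eq_true_eq]
      rw [show ((List.zip xs ys).all fun p => decide (p.1 ≤ p.2)) = vleq xs ys from rfl]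
      rw [ih ys hb]

theorem pruneGo_spec (k : Nat) : ∀ (rs kept : List (List Int)), EqLen k kept → EqLen k rs →
    (∀ c ∈ pruneGo kept rs, c ∈ kept ∨ c ∈ rs) ∧
    (∀ x ∈ kept, ∃ c ∈ pruneGo kept rs, DomL x c) ∧
    (∀ x ∈ rs, ∃ c ∈ pruneGo kept rs, DomL x c) := by
  intro rs
  induction rs with
  | nil =>
    intro kept hk _
    refine ⟨fun c hc => Or.inl (by simpa [pruneGo] using hc),
      fun x hx => ⟨x, by simpa [pruneGo] using hx, DomL_refl x⟩,
      fun x hx => by simp at hx⟩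
  | cons r rs' ih =>
    intro kept hk hrs
    have hrk : r.length = k := hrs r List.mem_cons_self
    have hrs' : EqLen k rs' := fun x hx => hrs x (List.mem_cons_of_mem _ hx)
    by_cases hany : kept.any (fun s => vleq r s) = true
    · obtain ⟨s, hs, hvs⟩ := List.any_eq_true.mp hany
      have hds : DomL r s := (vleq_iff_DomL r s (by rw [hrk, hk s hs])).mp hvs
      have heq : pruneGo kept (r :: rs') = pruneGo kept rs' := by
        rw [pruneGo]; simp [hany]
      obtain ⟨c1, c2, c3⟩ := ih kept hk hrs'
      rw [heq]
      refine ⟨fun c hc => (c1 c hc).imp id (List.mem_cons_of_mem _), c2, ?_⟩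
      intro x hx
      rcases List.mem_cons.mp hx with rfl | hx
      · obtain ⟨c, hc, hdc⟩ := c2 s hs
        exact ⟨c, hc, DomL_trans hds hdc⟩
      · exact c3 x hx
    · have heq : pruneGo kept (r :: rs') = pruneGo ((kept.filter (fun s => ! vleq s r)) ++ [r]) rs' := by
        rw [pruneGo]; simp [hany]
      have hk' : EqLen k ((kept.filter (fun s => ! vleq s r)) ++ [r]) := by
        intro x hx
        rcases List.mem_append.mp hx with hx | hx
        · exact hk x (List.mem_of_mem_filter hx)
        · rw [List.mem_singleton.mp hx]; exact hrk
      obtain ⟨c1, c2, c3⟩ := ih _ hk' hrs'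
      rw [heq]
      have hrmem : ∃ c ∈ pruneGo ((kept.filter (fun s => ! vleq s r)) ++ [r]) rs', DomL r c :=
        c2 r (List.mem_append_right _ (List.mem_singleton_self r))
      refine ⟨?_, ?_, ?_⟩
      · intro c hc
        rcases c1 c hc with hc | hc
        · rcases List.mem_append.mp hc with hc | hc
          · exact Or.inl (List.mem_of_mem_filter hc)
          · exact Or.inr (List.mem_cons.mpr (Or.inl (List.mem_singleton.mp hc)))
        · exact Or.inr (List.mem_cons_of_mem _ hc)
      · intro x hx
        by_cases hxr : vleq x r = true
        · obtain ⟨c, hc, hdc⟩ := hrmem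
          exact ⟨c, hc, DomL_trans ((vleq_iff_DomL x r (by rw [hk x hx, hrk])).mp hxr) hdc⟩
        · refine c2 x (List.mem_append_left _ ?_)
          exact List.mem_filter.mpr ⟨hx, by simp [hxr]⟩
      · intro x hx
        rcases List.mem_cons.mp hx with rfl | hx
        · exact hrmem
        · exact c3 x hx

theorem pruneB_spec (k : Nat) (m : List (List Int)) (hm : EqLen k m) :
    (∀ c ∈ pruneB m, c ∈ m) ∧ (∀ x ∈ m, ∃ c ∈ pruneB m, DomL x c) := by
  obtain ⟨c1, _, c3⟩ := pruneGo_spec k m [] (fun x hx => by simp at hx) hm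
  exact ⟨fun c hc => ((c1 c hc).resolve_left (by simp)), c3⟩

theorem V_pruneB (k : Nat) (m : List (List Int)) (hm : EqLen k m) : V (pruneB m) = V m := by
  obtain ⟨c1, c2⟩ := pruneB_spec k m hm
  exact Vmutual k (pruneB m) m (fun r hr => hm r (c1 r hr)) hm
    (fun a ha => ⟨a, c1 a ha, DomL_refl a⟩) c2

theorem volB_eq_V (k : Nat) : ∀ (n : Nat) (m : List (List Int)), m.length = n → EqLen k m →
    volB m = V m := by
  intro n
  induction n using Nat.strong_induction_on with
  | _ n ih =>
    intro m hn hm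
    have hWp := V_pruneB k m hm
    have hsub := (pruneB_spec k m hm).1
    rw [volB]
    split
    · next h =>
      rw [← hWp, h, V_nil]
    · next b rest h =>
      have hble : rest.length + 1 ≤ m.length := by
        have := pruneB_length_le m
        rw [h] at this
        simpa using this
      have hkb : EqLen k (b :: rest) := fun x hx => hm x (hsub x (h ▸ hx))
      have hkrest : EqLen k rest := fun x hx => hkb x (List.mem_cons_of_mem _ hx)
      have h1 : volB rest = V rest :=
        ih rest.length (by omega) rest rfl hkrest
      have h2 : volB (rest.map (fun r => (b.zip r).map (fun p => min p.1 p.2))) =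
          V (rest.map (pm b)) := by
        have hmapeq : rest.map (fun r => (b.zip r).map (fun p => min p.1 p.2)) =
            rest.map (pm b) := List.map_congr_left (fun r _ => zip_map_min_eq_pm b r)
        rw [hmapeq]
        refine ih rest.length (by omega) _ (by simp) ?_
        intro x hx
        obtain ⟨y, hy, rfl⟩ := List.mem_map.mp hx
        rw [pm_length, hkrest y hy, hkb b List.mem_cons_self, min_self]
      rw [h1, h2, ← hWp, h, V_cons, ← List.prod_eq_foldl]
def trunc (k : Nat) (l : List (List Int)) : List (List Int) := l.map (fun r => r.take k)

theorem take_eq_head_cons (r : List Int) (k : Nat) (hr : r ≠ []) (hk : 1 ≤ k) :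
    r.take k = r.headI :: r.tail.take (k - 1) := by
  match r with
  | h :: t =>
    have : k = (k - 1) + 1 := by omega
    rw [this, List.take_succ_cons]
    rfl

theorem tailsGe_trunc (v : Int) (k1 : Nat) (hk : 1 ≤ k1) :
    ∀ l : List (List Int), (∀ r ∈ l, r ≠ []) →
      tailsGe v (trunc k1 l) =
        trunc (k1 - 1) ((l.filter (fun r => decide (v ≤ r.headI))).map List.tail) := by
  intro l
  induction l with
  | nil => intro _; rfl
  | cons r rest ih =>
    intro hne
    have ih' := ih (fun x hx => hne x (List.mem_cons_of_mem _ hx))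
    have hr := hne r List.mem_cons_self
    unfold tailsGe trunc at ih' ⊢
    rw [List.map_cons, take_eq_head_cons r k1 hr hk, List.filter_cons, List.filter_cons]
    simp only [List.headI_cons]
    by_cases hv : v ≤ r.headI
    · simp only [hv, decide_true, if_true, List.map_cons, List.tail_cons]
      rw [ih']
    · simp only [hv, decide_false, Bool.false_eq_true, if_false]
      exact ih'

theorem preGroup_cons (x : List Int) (xs : List (List Int)) :
    preGroup (x :: xs) =
      (x.headI, (x :: xs.takeWhile (fun y => y.headI == x.headI)).map List.tail) ::
        preGroup (xs.dropWhile (fun y => y.headI == x.headI)) := by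
  rw [preGroup]
  refine congrArg₂ _ (congrArg _ ?_) rfl
  exact List.map_congr_left (fun r _ => PySem.List.slice_from_one r)

theorem groupSplit (x : List Int) (xs : List (List Int))
    (hs : (x :: xs).Pairwise (fun a b => b.headI ≤ a.headI)) :
    (x :: xs) = (x :: xs.takeWhile (fun y => y.headI == x.headI)) ++
        xs.dropWhile (fun y => y.headI == x.headI)
      ∧ (∀ y ∈ x :: xs.takeWhile (fun y => y.headI == x.headI), y.headI = x.headI)
      ∧ (∀ y ∈ xs.dropWhile (fun y => y.headI == x.headI), y.headI < x.headI) := by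
  refine ⟨by rw [List.cons_append, List.takeWhile_append_dropWhile], ?_, ?_⟩
  · intro y hy
    rcases List.mem_cons.mp hy with rfl | hy
    · rfl
    · have := List.mem_takeWhile_imp hy
      simpa using this
  · intro y hy
    have hyxs : y ∈ xs := List.dropWhile_sublist _ |>.mem hy
    have hyle : y.headI ≤ x.headI := (List.pairwise_cons.mp hs).1 y hyxs
    rcases eq_or_lt_of_le hyle with heq | hlt
    · exfalso
      -- y has the same head as x yet lies in the dropWhile suffix: the first element of that
      -- suffix already fails the predicate and is ≥ y by sortedness, a contradiction
      match hdw : xs.dropWhile (fun y => y.headI == x.headI) with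
      | [] => rw [hdw] at hy; simp at hy
      | z :: zs =>
        have hzfail : (fun y : List Int => y.headI == x.headI) z = false := by
          have := List.head?_dropWhile_not (fun y : List Int => y.headI == x.headI) xs
          rw [hdw] at this
          simpa using this
        simp only [beq_eq_false_iff_ne, ne_eq] at hzfail
        have hzxs : z ∈ xs := (List.dropWhile_sublist _).mem (hdw ▸ List.mem_cons_self)
        have hzle : z.headI ≤ x.headI := (List.pairwise_cons.mp hs).1 z hzxs
        rw [hdw] at hy
        rcases List.mem_cons.mp hy with rfl | hy
        · exact hzfail heq
        · have hpzs : (z :: zs).Pairwise (fun a b => b.headI ≤ a.headI) := by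
            have hxs : xs.Pairwise (fun a b => b.headI ≤ a.headI) := (List.pairwise_cons.mp hs).2
            exact hdw ▸ List.Pairwise.sublist (List.dropWhile_sublist _) hxs
          have : y.headI ≤ z.headI := (List.pairwise_cons.mp hpzs).1 y hy
          omega
    · exact hlt

theorem preGroup_fst_mem : ∀ (ns : Nat) (s : List (List Int)), s.length = ns →
    s.Pairwise (fun a b => b.headI ≤ a.headI) →
    (∀ r ∈ s, r.headI ∈ (preGroup s).map Prod.fst) ∧
    ((preGroup s).map Prod.fst).Pairwise (· > ·) ∧
    (∀ p ∈ preGroup s, ∃ r ∈ s, p.1 = r.headI) := by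
  intro ns
  induction ns using Nat.strong_induction_on with
  | _ ns ih =>
    intro s hns hs
    match s with
    | [] => exact ⟨by simp, by simp [preGroup], by simp [preGroup]⟩
    | x :: xs =>
      obtain ⟨hsplit, hgrp, hrest⟩ := groupSplit x xs hs
      have hrest_pw : (xs.dropWhile (fun y => y.headI == x.headI)).Pairwise
          (fun a b => b.headI ≤ a.headI) :=
        List.Pairwise.sublist (List.dropWhile_sublist _) (List.pairwise_cons.mp hs).2
      have hlen : (xs.dropWhile (fun y => y.headI == x.headI)).length < ns := by
        have := List.length_dropWhile_le (fun y : List Int => y.headI == x.headI) xs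
        simp only [List.length_cons] at hns
        omega
      obtain ⟨ihm, ihp, ihv⟩ := ih _ hlen _ rfl hrest_pw
      rw [preGroup_cons]
      refine ⟨?_, ?_, ?_⟩
      · intro r hr
        rw [hsplit] at hr
        rcases List.mem_append.mp hr with hr | hr
        · rw [hgrp r hr]
          simp
        · simp only [List.map_cons, List.mem_cons]
          exact Or.inr (ihm r hr)
      · simp only [List.map_cons]
        rw [List.pairwise_cons]
        refine ⟨?_, ihp⟩
        intro w hw
        obtain ⟨⟨v2, g2⟩, hg2, rfl⟩ := List.mem_map.mp hw
        obtain ⟨r, hr, hr2⟩ := ihv _ hg2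
        simp only at hr2
        rw [hr2]
        exact hrest r hr
      · intro p hp
        rcases List.mem_cons.mp hp with rfl | hp
        · exact ⟨x, List.mem_cons_self, rfl⟩
        · obtain ⟨r, hr, hr2⟩ := ihv p hp
          exact ⟨r, by
            rw [hsplit]
            exact List.mem_append_right _ hr, hr2⟩
theorem pySset_take : ∀ (k : Nat) (c g : List Int), k ≤ c.length → k ≤ g.length →
    pySset c g = true → DomL (c.take k) (g.take k) := by
  intro k
  induction k with
  | zero => intro c g _ _ _; simp [DomL]
  | succ k ih =>
    intro c g hc hg hs
    match c, g with
    | x :: xs, y :: ys =>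
      simp only [List.length_cons] at hc hg
      simp only [pySset, List.zip_cons_cons, List.all_cons, Bool.and_eq_true,
        decide_eq_true_eq] at hs
      rw [List.take_succ_cons, List.take_succ_cons, DomL_cons_iff]
      exact ⟨hs.1, ih xs ys (by omega) (by omega) hs.2⟩

theorem currentLayer (fuel : Nat) (d : Int) (hd : 2 ≤ d)
    (Hrec : ∀ C : List (List Int), C ≠ [] → (∀ r ∈ C, d - 1 ≤ (r.length : Int)) →
      goA fuel (d - 1) C = V (trunc (d - 1).toNat C))
    (v : Int) (C hpre srest : List (List Int))
    (hpne : hpre ≠ [])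
    (hhp : ∀ r ∈ hpre, d ≤ (r.length : Int) ∧ v ≤ r.headI)
    (hsr : ∀ r ∈ srest, d ≤ (r.length : Int) ∧ r.headI < v)
    (hCmem : ∀ c ∈ C, ∃ x ∈ hpre, c = x.tail)
    (hCdom : ∀ x ∈ hpre, ∃ c ∈ C, DomL (x.tail.take (d - 1).toNat) (c.take (d - 1).toNat)) :
    goA fuel (d - 1) C = V (tailsGe v (trunc d.toNat (hpre ++ srest))) := by
  have hk1 : d.toNat = (d - 1).toNat + 1 := by omega
  set k := (d - 1).toNat with hk
  have hCne : C ≠ [] := by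
    match hpre, hpne with
    | x :: _, _ =>
      obtain ⟨c, hc, _⟩ := hCdom x List.mem_cons_self
      intro hC
      rw [hC] at hc
      simp at hc
  have hClen : ∀ c ∈ C, d - 1 ≤ (c.length : Int) := by
    intro c hc
    obtain ⟨x, hx, rfl⟩ := hCmem c hc
    have := (hhp x hx).1
    simp only [List.length_tail]
    omega
  rw [Hrec C hCne hClen]
  have hne : ∀ r ∈ hpre ++ srest, r ≠ [] := by
    intro r hr
    have : d ≤ (r.length : Int) := by
      rcases List.mem_append.mp hr with h | h
      · exact (hhp r h).1
      · exact (hsr r h).1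
    intro hnil
    rw [hnil] at this
    simp at this
    omega
  have hfil : (hpre ++ srest).filter (fun r => decide (v ≤ r.headI)) = hpre := by
    rw [List.filter_append]
    rw [List.filter_eq_self.mpr (fun r hr => by simpa using (hhp r hr).2)]
    rw [List.filter_eq_nil_iff.mpr (fun r hr => by
      have := (hsr r hr).2
      simp only [decide_eq_true_eq]
      omega)]
    rw [List.append_nil]
  rw [tailsGe_trunc v d.toNat (by omega) (hpre ++ srest) hne, hfil, hk1]
  simp only [Nat.add_sub_cancel]
  refine Vmutual k _ _ ?_ ?_ ?_ ?_
  · intro a ha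
    obtain ⟨c, hc, rfl⟩ := List.mem_map.mp ha
    rw [List.length_take]
    have := hClen c hc
    omega
  · intro b hb
    obtain ⟨c2, hc2, rfl⟩ := List.mem_map.mp hb
    obtain ⟨x, hx, rfl⟩ := List.mem_map.mp hc2
    rw [List.length_take, List.length_tail]
    have := (hhp x hx).1
    omega
  · intro a ha
    obtain ⟨c, hc, rfl⟩ := List.mem_map.mp ha
    obtain ⟨x, hx, rfl⟩ := hCmem c hc
    refine ⟨x.tail.take k, ?_, DomL_refl _⟩
    exact List.mem_map.mpr ⟨x.tail, List.mem_map.mpr ⟨x, hx, rfl⟩, rfl⟩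
  · intro b hb
    obtain ⟨c2, hc2, rfl⟩ := List.mem_map.mp hb
    obtain ⟨x, hx, rfl⟩ := List.mem_map.mp hc2
    obtain ⟨c, hc, hdom⟩ := hCdom x hx
    exact ⟨c.take k, List.mem_map.mpr ⟨c, hc, rfl⟩, hdom⟩

theorem loopMain (fuel : Nat) (d : Int) (hd : 2 ≤ d)
    (Hrec : ∀ C : List (List Int), C ≠ [] → (∀ r ∈ C, d - 1 ≤ (r.length : Int)) →
      goA fuel (d - 1) C = V (trunc (d - 1).toNat C)) :
    ∀ (ns : Nat) (srest : List (List Int)), srest.length = ns →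
    ∀ (v : Int) (C hpre : List (List Int)),
      hpre ≠ [] →
      (∀ r ∈ hpre, d ≤ (r.length : Int) ∧ v ≤ r.headI) →
      (∀ r ∈ srest, d ≤ (r.length : Int) ∧ r.headI < v) →
      srest.Pairwise (fun a b => b.headI ≤ a.headI) →
      (∀ c ∈ C, ∃ x ∈ hpre, c = x.tail) →
      (∀ x ∈ hpre, ∃ c ∈ C, DomL (x.tail.take (d - 1).toNat) (c.take (d - 1).toNat)) →
      loopA fuel d ((v, C) :: (preGroup srest ++ [(0, [])])) =
        layerSum (v :: ((preGroup srest).map Prod.fst ++ [0]))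
          (trunc d.toNat (hpre ++ srest)) := by
  intro ns
  induction ns using Nat.strong_induction_on with
  | _ ns ih =>
    intro srest hns v C hpre hpne hhp hsr hpw hCmem hCdom
    match srest with
    | [] =>
      rw [preGroup]
      have hcur := currentLayer fuel d hd Hrec v C hpre [] hpne hhp (by simp) hCmem hCdom
      show loopA fuel d ((v, C) :: (0, []) :: []) = _
      rw [loopA, loopA]
      show (v - 0) * goA fuel (d - 1) C + 0 =
        (v - 0) * V (tailsGe v (trunc d.toNat (hpre ++ []))) + layerSum [0] (trunc d.toNat (hpre ++ []))
      rw [hcur]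
      rfl
    | x :: xs =>
      obtain ⟨hsplit, hgrp, hdwlt⟩ := groupSplit x xs hpw
      set tw := xs.takeWhile (fun y => y.headI == x.headI) with htw
      set dw := xs.dropWhile (fun y => y.headI == x.headI) with hdw
      set grp : List (List Int) := x :: tw with hgrpdef
      set g : List (List Int) := grp.map List.tail with hgdef
      have hgrpsub : ∀ y ∈ grp, y ∈ x :: xs := by
        intro y hy
        rw [hsplit]
        exact List.mem_append_left _ hy
      have hdwsub : ∀ y ∈ dw, y ∈ x :: xs := by
        intro y hy
        rw [hsplit]
        exact List.mem_append_right _ hy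
      have hwv : x.headI < v := (hsr x List.mem_cons_self).2
      rw [preGroup_cons, ← htw, ← hdw]
      show loopA fuel d ((v, C) :: (x.headI, g) :: (preGroup dw ++ [(0, [])])) = _
      rw [loopA]
      have hcur := currentLayer fuel d hd Hrec v C hpre (x :: xs) hpne hhp hsr hCmem hCdom
      have hlendw : dw.length < ns := by
        have := List.length_dropWhile_le (fun y : List Int => y.headI == x.headI) xs
        simp only [List.length_cons] at hns
        rw [hdw]
        omega
      have happ : (hpre ++ grp) ++ dw = hpre ++ x :: xs := by
        rw [List.append_assoc, ← hsplit]
      have hIH := ih dw.length hlendw dw rfl x.headI (g ++ stillNeeded C g) (hpre ++ grp)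
        (by simp [hgrpdef])
        (by
          intro r hr
          rcases List.mem_append.mp hr with hr | hr
          · obtain ⟨h1, h2⟩ := hhp r hr
            exact ⟨h1, by omega⟩
          · refine ⟨(hsr r (hgrpsub r hr)).1, ?_⟩
            rw [hgrp r hr])
        (by
          intro r hr
          exact ⟨(hsr r (hdwsub r hr)).1, hdwlt r hr⟩)
        (by
          rw [hdw]
          exact List.Pairwise.sublist (List.dropWhile_sublist _)
            (List.pairwise_cons.mp hpw).2)
        (by
          intro c hc
          rcases List.mem_append.mp hc with hc | hc
          · obtain ⟨y, hy, rfl⟩ := List.mem_map.mp hc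
            exact ⟨y, List.mem_append_right _ hy, rfl⟩
          · obtain ⟨x', hx', rfl⟩ := (by
              have : c ∈ C := List.mem_of_mem_filter hc
              exact hCmem c this : ∃ x' ∈ hpre, c = x'.tail)
            exact ⟨x', List.mem_append_left _ hx', rfl⟩)
        (by
          intro x' hx'
          rcases List.mem_append.mp hx' with hx' | hx'
          · obtain ⟨c, hc, hdom⟩ := hCdom x' hx'
            by_cases hkeep : (g.any (fun w => pySset c w)) = true
            · obtain ⟨gEl, hgEl, hss⟩ := List.any_eq_true.mp hkeep
              have hclen : (d - 1).toNat ≤ c.length := by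
                obtain ⟨x2, hx2, rfl⟩ := hCmem c hc
                have := (hhp x2 hx2).1
                rw [List.length_tail]
                omega
              have hglen : (d - 1).toNat ≤ gEl.length := by
                obtain ⟨y, hy, rfl⟩ := List.mem_map.mp hgEl
                have := (hsr y (hgrpsub y hy)).1
                rw [List.length_tail]
                omega
              refine ⟨gEl, List.mem_append_left _ hgEl, ?_⟩
              exact DomL_trans hdom (pySset_take _ c gEl hclen hglen hss)
            · refine ⟨c, List.mem_append_right _ ?_, hdom⟩
              unfold stillNeeded
              refine List.mem_filter.mpr ⟨hc, ?_⟩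
              simp [hkeep]
          · refine ⟨x'.tail, List.mem_append_left _ (List.mem_map.mpr ⟨x', hx', rfl⟩),
              DomL_refl _⟩)
      rw [hIH, happ, hcur]
      show _ = (v - x.headI) * V (tailsGe v (trunc d.toNat (hpre ++ x :: xs))) +
        layerSum (x.headI :: ((preGroup dw).map Prod.fst ++ [0])) (trunc d.toNat (hpre ++ x :: xs))
      rfl
theorem mainA : ∀ (fuel : Nat) (d : Int) (l : List (List Int)), d.toNat ≤ fuel → 1 ≤ d →
    l ≠ [] → (∀ r ∈ l, d ≤ (r.length : Int)) → goA fuel d l = V (trunc d.toNat l) := by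
  intro fuel
  induction fuel using Nat.strong_induction_on with
  | _ fuel ih =>
    intro d l hfuel hd hlne hlen
    match fuel with
    | 0 => omega
    | f + 1 =>
      rw [goA]
      by_cases hd1 : d = 1
      · subst hd1
        simp only [if_true]
        match l, hlne with
        | r :: rest, _ =>
          have htr : trunc ((1 : Int)).toNat (r :: rest) =
              ((r :: rest).map List.headI).map (fun h => [h]) := by
            unfold trunc
            rw [List.map_map]
            refine List.map_congr_left ?_
            intro y hy
            have hyne : y ≠ [] := by
              have := hlen y hy
              intro h
              rw [h] at this
              simp at this
            rw [take_eq_head_cons y _ hyne (by omega)]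
            rfl
          rw [htr]
          rw [show (r :: rest).map List.headI = r.headI :: rest.map List.headI from rfl]
          rw [Vmax (rest.map List.headI).length (rest.map List.headI) r.headI rfl]
      · have hd2 : 2 ≤ d := by omega
        simp only [hd1, if_false]
        unfold preprocess_py
        set s := PySem.List.sorted l (fun r => r.headI) true with hsdef
        have hperm : s.Perm l := PySem.List.sorted_perm l (fun r => r.headI) true
        have hspw : s.Pairwise (fun a b => b.headI ≤ a.headI) := PySem.List.sorted_pairwise_rev l (fun r => r.headI)
        have hsne : s ≠ [] := by
          intro h
          rw [PySem.List.sorted_eq_nil_iff] at h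
          exact hlne h
        have hslen : ∀ r ∈ s, d ≤ (r.length : Int) := by
          intro r hr
          exact hlen r (hperm.mem_iff.mp hr)
        match s, hsne, hspw, hslen, hperm with
        | x :: xs, _, hspw, hslen, hperm =>
          obtain ⟨hsplit, hgrp, hdwlt⟩ := groupSplit x xs hspw
          set tw := xs.takeWhile (fun y => y.headI == x.headI) with htw
          set dw := xs.dropWhile (fun y => y.headI == x.headI) with hdw
          set grp : List (List Int) := x :: tw with hgrpdef
          set g : List (List Int) := grp.map List.tail with hgdef
          have hgrpsub : ∀ y ∈ grp, y ∈ x :: xs := by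
            intro y hy; rw [hsplit]; exact List.mem_append_left _ hy
          have hdwsub : ∀ y ∈ dw, y ∈ x :: xs := by
            intro y hy; rw [hsplit]; exact List.mem_append_right _ hy
          have Hrec : ∀ C : List (List Int), C ≠ [] → (∀ r ∈ C, d - 1 ≤ (r.length : Int)) →
              goA f (d - 1) C = V (trunc (d - 1).toNat C) := by
            intro C hC hClen
            exact ih f (by omega) (d - 1) C (by omega) (by omega) hC hClen
          have hLM := loopMain f d hd2 Hrec dw.length dw rfl x.headI g grp
            (by simp [hgrpdef])
            (by
              intro r hr
              refine ⟨hslen r (hgrpsub r hr), ?_⟩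
              rw [hgrp r hr])
            (by
              intro r hr
              exact ⟨hslen r (hdwsub r hr), hdwlt r hr⟩)
            (by
              rw [hdw]
              exact List.Pairwise.sublist (List.dropWhile_sublist _)
                (List.pairwise_cons.mp hspw).2)
            (by
              intro c hc
              obtain ⟨y, hy, rfl⟩ := List.mem_map.mp hc
              exact ⟨y, hy, rfl⟩)
            (by
              intro x' hx'
              exact ⟨x'.tail, List.mem_map.mpr ⟨x', hx', rfl⟩, DomL_refl _⟩)
          rw [preGroup_cons, ← htw, ← hdw, ← hgdef]
          rw [List.cons_append, hLM]
          have hgd : grp ++ dw = x :: xs := hsplit.symm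
          rw [hgd]
          have hfst : ((preGroup (x :: xs)).map Prod.fst) =
              x.headI :: (preGroup dw).map Prod.fst := by
            rw [preGroup_cons, ← htw, ← hdw, List.map_cons]
          have hVL := Vlayers ((preGroup (x :: xs)).map Prod.fst) (trunc d.toNat (x :: xs))
            (by rw [hfst]; simp)
            (preGroup_fst_mem (x :: xs).length (x :: xs) rfl hspw).2.1
            (by
              intro r' hr'
              obtain ⟨r, hr, rfl⟩ := List.mem_map.mp hr'
              have hrne : r ≠ [] := by
                have := hslen r hr
                intro h; rw [h] at this; simp at this; omega
              refine ⟨r.headI, r.tail.take (d.toNat - 1), ?_, ?_⟩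
              · exact take_eq_head_cons r d.toNat hrne (by omega)
              · exact (preGroup_fst_mem (x :: xs).length (x :: xs) rfl hspw).1 r hr)
          rw [hfst] at hVL
          rw [List.cons_append] at hVL
          rw [← hVL]
          exact Vperm (trunc d.toNat (x :: xs)).length _ _ rfl (hperm.map _)
theorem range_get_take (r : List Int) (d : Int) (h0 : 0 ≤ d) (hlen : d ≤ (r.length : Int)) :
    (PySem.List.pyRange 0 d 1).map (fun i => PySem.List.pyGetD r i 0) = r.take d.toNat := by
  rw [PySem.List.pyRange_one, List.map_map]
  apply List.ext_getElem
  · simp only [List.length_map, List.length_range, List.length_take]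
    omega
  · intro i h1 h2
    simp only [List.length_map, List.length_range] at h1
    simp only [List.getElem_map, List.getElem_range, Function.comp]
    rw [show ((0 : Int) + (i : Int)) = (i : Int) from by ring]
    rw [PySem.List.pyGetD_natCast]
    rw [List.getElem_take]
    rw [List.getD_eq_getElem?_getD, List.getElem?_eq_getElem (by omega)]
    rfl

theorem altB_eq_V (d : Int) (l : List (List Int)) (hd : 1 ≤ d)
    (hlen : ∀ r ∈ l, d ≤ (r.length : Int)) :
    solve_rec_py_alt d l = V (trunc d.toNat l) := by
  unfold solve_rec_py_alt
  have hsl : l.map (fun r =>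
      (PySem.List.pyRange 0 d 1).map (fun i => PySem.List.pyGetD r i 0)) = trunc d.toNat l := by
    unfold trunc
    exact List.map_congr_left (fun r hr => range_get_take r d (by omega) (hlen r hr))
  rw [hsl]
  refine volB_eq_V d.toNat (trunc d.toNat l).length _ rfl ?_
  intro r hr
  obtain ⟨y, hy, rfl⟩ := List.mem_map.mp hr
  rw [List.length_take]
  have := hlen y hy
  omega
theorem loopA_single (fuel : Nat) (d : Int) (p : Int × List (List Int)) :
    loopA fuel d [p] = 0 := by
  rw [loopA]

theorem solve_rec_py_empty (d : Int) (hd : d ≠ 1) : solve_rec_py d [] = 0 := by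
  unfold solve_rec_py
  match h : d.toNat with
  | 0 => rw [goA]
  | n + 1 =>
    rw [goA]
    simp only [hd, if_false]
    unfold preprocess_py
    rw [show PySem.List.sorted ([] : List (List Int)) (fun r => r.headI) true = [] from rfl]
    rw [preGroup, List.nil_append, loopA_single]
-- ===== VERDICT (by name: the statement is the Claim_ definition above) =====
theorem solve_rec_py_spec : Claim_equal_solve_rec_py := by
  unfold Claim_equal_solve_rec_py
  intro d l _ hpre
  obtain ⟨hlen, hemp, hne⟩ := hpre
  unfold Spec_solve_rec_py
  by_cases hl : l = []
  · subst hl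
    rw [solve_rec_py_empty d (hemp rfl)]
    have : solve_rec_py_alt d [] = V [] := by
      unfold solve_rec_py_alt
      rw [List.map_nil]
      exact volB_eq_V 0 0 [] rfl (fun r hr => by simp at hr)
    rw [this, V_nil]
  · have hd : 1 ≤ d := hne hl
    unfold solve_rec_py
    rw [mainA d.toNat d l (le_refl _) hd hl hlen]
    rw [altB_eq_V d l hd hlen]
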